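-- pv_equiv track=rewrite | github.com/Helloworld616/algorithm | Programmers/2020_카카오_인턴십/1_키패드누르기/sol1.py | solution
-- ===== SOURCE A (Python) =====
-- from collections import deque
--
-- def bfs(start, goal):
--     # 상하좌우 4방향을 나타내는 리스트
--     dr = [-1, 1, 0, 0]
--     dc = [0, 0, -1, 1]
--
--     # 방문 배열 초기화
--     visited = [[-1 for _ in range(3)] for _ in range(4)]
--     visited[start[0]][start[1]] = 0
--
--     # 만약 출발점과 도착점이 같다면 바로 결과값 반환
--     if start[0] == goal[0] and start[1] == goal[1]:
--         return visited[start[0]][start[1]]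
--
--     # BFS 탐색을 위한 큐 생성. 생성 후 출발 좌표 넣기.
--     queue = deque()
--     queue.append(start)
--
--     # BFS 시작
--     while queue:
--         # 큐에서 좌표 추출
--         spot = queue.popleft()
--         row = spot[0]
--         col = spot[1]
--
--         # 4방향 탐색
--         for i in range(4):
--             n_row = row + dr[i]
--             n_col = col + dc[i]
--             # 유효 범위 안에 있고 아직 방문하지 않았을 경우
--             if 0 <= n_row < 4 and 0 <= n_col < 3 and visited[n_row][n_col] == -1:
--                 # 방문 체크한 뒤 거리를 1 늘림!
--                 visited[n_row][n_col] = visited[row][col] + 1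
--                 # 방문할 곳이 도착점과 같다면 바로 결과값 반환
--                 if n_row == goal[0] and n_col == goal[1]:
--                     return visited[n_row][n_col]
--                 # 새로운 좌표를 큐에 삽입
--                 queue.append((n_row, n_col))
--
-- def solution(numbers, hand):
--     answer = ''  # 답안 초기화
--     # 각 번호를 입력해야 하는 손가락 정보 저장
--     # L은 왼손, R은 오른손, M은 중앙에 있는 번호들
--     keyhand = ['M', 'L', 'M', 'R', 'L', 'M', 'R', 'L', 'M', 'R']
--
--     # 각 번호의 좌표 저장
--     location = []
--     for i in range(3):
--         for j in range(3):
--             location.append((i, j))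
--
--     # 0의 좌표도 추가하고
--     location.insert(0, (3, 1))
--     # 왼손 출발점과 오른손 출발점을 설정한다.
--     left = (3, 0)
--     right = (3, 2)
--
--     # 주어진 번호 리스트에서 번호를 하나씩 꺼낸다.
--     for number in numbers:
--         # 왼손으로 쳐야하는 번호일 경우
--         # 좌표 옮기고 정답에 L 추가
--         if keyhand[number] == 'L':
--             left = location[number]
--             answer += 'L'
--         # 오른손으로 쳐야하는 번호일 경우
--         # 좌표 옮기고 정답에 R 추가
--         elif keyhand[number] == 'R':
--             right = location[number]
--             answer += 'R'
--         # 가운데에 있는 번호일 경우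
--         else:
--             # 왼손으로부터의 거리와 오른손으로부터의 거리를 구한다.
--             l_distance = bfs(left, location[number])
--             r_distance = bfs(right, location[number])
--             # 왼손 거리가 더 가까울 경우
--             # 왼손 좌표를 이동하고 정답에 L 추가
--             if l_distance < r_distance:
--                 left = location[number]
--                 answer += 'L'
--             # 오른손 거리가 더 가까울 경우
--             # 오른손 좌표를 이동하고 정답에 R 추가
--             elif l_distance > r_distance:
--                 right = location[number]
--                 answer += 'R'
--             # 두 손의 거리가 똑같을 경우
--             else:
--                 # 왼손잡이일 경우에는 왼손을 택하고, 오른손잡이일 경우에는 오른손을 택한다.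
--                 if hand == 'left':
--                     left = location[number]
--                     answer += 'L'
--                 else:
--                     right = location[number]
--                     answer += 'R'
--
--     return answer
-- ===== SOURCE B (Python) =====
-- POS = {0: (3, 1), 1: (0, 0), 2: (0, 1), 3: (0, 2), 4: (1, 0),
--        5: (1, 1), 6: (1, 2), 7: (2, 0), 8: (2, 1), 9: (2, 2)}
-- LEFT_KEYS = {1, 4, 7}
-- RIGHT_KEYS = {3, 6, 9}
--
--
-- def solution(numbers, hand):
--     left, right = (3, 0), (3, 2)
--     out = []
--     for n in numbers:
--         p = POS[n]
--         if n in LEFT_KEYS: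
--             ch = 'L'
--         elif n in RIGHT_KEYS:
--             ch = 'R'
--         else:
--             dl = abs(left[0] - p[0]) + abs(left[1] - p[1])
--             dr = abs(right[0] - p[0]) + abs(right[1] - p[1])
--             if dl < dr:
--                 ch = 'L'
--             elif dl > dr:
--                 ch = 'R'
--             else:
--                 ch = 'L' if hand == 'left' else 'R'
--         if ch == 'L':
--             left = p
--         else:
--             right = p
--         out.append(ch)
--     return ''.join(out)
-- ===== Notes on version B (the rewrite author's own statement) =====
-- stated objective: simpler
-- what changed: Replaces the per-digit BFS over the 4x3 grid with a closed-form Manhattan-distance formula on a literal digit->coordinate dict, chooses the hand by set membership instead of a keyhand table, and joins a list of chars instead of string concatenation.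
-- outside the precondition, e.g. on solution([-1], 'right'): A returns 'R', B raises KeyError; on solution([-10], 'left'): A returns 'L', B raises KeyError
import Mathlib
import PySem

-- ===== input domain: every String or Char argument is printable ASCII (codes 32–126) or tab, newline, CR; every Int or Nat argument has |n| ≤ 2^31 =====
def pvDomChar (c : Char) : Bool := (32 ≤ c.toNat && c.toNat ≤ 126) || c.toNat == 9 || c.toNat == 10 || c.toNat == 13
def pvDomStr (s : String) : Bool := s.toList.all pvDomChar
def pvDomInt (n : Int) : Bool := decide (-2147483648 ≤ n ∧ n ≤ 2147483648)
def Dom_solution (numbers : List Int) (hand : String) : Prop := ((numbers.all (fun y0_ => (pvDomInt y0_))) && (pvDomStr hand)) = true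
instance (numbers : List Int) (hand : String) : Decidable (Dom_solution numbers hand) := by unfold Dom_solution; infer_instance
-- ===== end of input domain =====

-- B replaces the per-digit BFS with a closed-form Manhattan distance on a digit→coordinate dict
-- and picks the forced hand by set membership (objective: simpler); same answer string.


-- ===== PORT A =====
def bfsDr : List Int := [-1, 1, 0, 0]
def bfsDc : List Int := [0, 0, -1, 1]

-- visited[r][c] read/write; exact for the in-range indices bfs uses (0 ≤ r < 4, 0 ≤ c < 3)
def vget (vis : List (List Int)) (r c : Int) : Int :=
  (PySem.List.pyGet? ((PySem.List.pyGet? vis r).getD []) c).getD 0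

def vset (vis : List (List Int)) (r c v : Int) : List (List Int) :=
  vis.set r.toNat ((vis[r.toNat]?.getD []).set c.toNat v)

-- the `for i in range(4)` body, with its early `return` as the Option component
def bfsExplore (goal : Int × Int) (row col : Int) :
    List Int → List (List Int) → List (Int × Int) → Option Int × List (List Int) × List (Int × Int)
  | [], vis, q => (none, vis, q)
  | i :: is, vis, q =>
    let nr := row + (PySem.List.pyGet? bfsDr i).getD 0
    let nc := col + (PySem.List.pyGet? bfsDc i).getD 0
    if 0 ≤ nr ∧ nr < 4 ∧ 0 ≤ nc ∧ nc < 3 ∧ vget vis nr nc = -1 then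
      let vis' := vset vis nr nc (vget vis row col + 1)
      if nr = goal.1 ∧ nc = goal.2 then (some (vget vis' nr nc), vis', q)
      else bfsExplore goal row col is vis' (q ++ [(nr, nc)])
    else bfsExplore goal row col is vis q

-- the `while queue` loop; fuel 20 > the 13 iterations a 4×3 grid can ever need (totality guard only)
def bfsLoop (goal : Int × Int) : Nat → List (List Int) → List (Int × Int) → Int
  | 0, _, _ => 0
  | _ + 1, _, [] => 0
  | fuel + 1, vis, spot :: rest =>
    match bfsExplore goal spot.1 spot.2 [0, 1, 2, 3] vis rest with
    | (some d, _, _) => d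
    | (none, vis', q') => bfsLoop goal fuel vis' q'

def bfs (start goal : Int × Int) : Int :=
  let visited := List.replicate 4 (List.replicate 3 (-1 : Int))
  let visited := vset visited start.1 start.2 0
  if start.1 = goal.1 ∧ start.2 = goal.2 then vget visited start.1 start.2
  else bfsLoop goal 20 visited [start]

def keyhand : List String := ["M", "L", "M", "R", "L", "M", "R", "L", "M", "R"]

def location : List (Int × Int) :=
  PySem.List.insert
    ((List.range 3).foldl
      (fun acc i => (List.range 3).foldl (fun acc j => acc ++ [((i : Int), (j : Int))]) acc) [])
    0 ((3 : Int), (1 : Int))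

-- the `for number in numbers` loop (answer += ch becomes ch ++ recursion)
def solLoop (hand : String) : List Int → (Int × Int) → (Int × Int) → String
  | [], _, _ => ""
  | n :: ns, left, right =>
    let kh := (PySem.List.pyGet? keyhand n).getD ""
    let loc := (PySem.List.pyGet? location n).getD (0, 0)
    if kh = "L" then "L" ++ solLoop hand ns loc right
    else if kh = "R" then "R" ++ solLoop hand ns left loc
    else
      let ld := bfs left loc
      let rd := bfs right loc
      if ld < rd then "L" ++ solLoop hand ns loc right
      else if rd < ld then "R" ++ solLoop hand ns left loc
      else if hand = "left" then "L" ++ solLoop hand ns loc right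
      else "R" ++ solLoop hand ns left loc

def solution (numbers : List Int) (hand : String) : String :=
  solLoop hand numbers (3, 0) (3, 2)

-- ===== PORT B =====
def posB : PySem.Dict Int (Int × Int) :=
  PySem.Dict.ofList [(0, (3, 1)), (1, (0, 0)), (2, (0, 1)), (3, (0, 2)), (4, (1, 0)),
                     (5, (1, 1)), (6, (1, 2)), (7, (2, 0)), (8, (2, 1)), (9, (2, 2))]
def leftKeys : PySem.Set Int := PySem.Set.ofList [1, 4, 7]
def rightKeys : PySem.Set Int := PySem.Set.ofList [3, 6, 9]

def altLoop (hand : String) : List Int → (Int × Int) → (Int × Int) → List String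
  | [], _, _ => []
  | n :: ns, left, right =>
    let p := (PySem.Dict.get? posB n).getD (0, 0)
    let ch :=
      if n ∈ leftKeys then "L"
      else if n ∈ rightKeys then "R"
      else
        let dl := |left.1 - p.1| + |left.2 - p.2|
        let dr := |right.1 - p.1| + |right.2 - p.2|
        if dl < dr then "L"
        else if dl > dr then "R"
        else if hand = "left" then "L" else "R"
    if ch = "L" then ch :: altLoop hand ns p right
    else ch :: altLoop hand ns left p

def solution_alt (numbers : List Int) (hand : String) : String :=
  PySem.Str.join "" (altLoop hand numbers (3, 0) (3, 2))

-- ===== PRECONDITION & SPEC =====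
-- Pre_ excludes entries outside 0..9, where A either raises IndexError (n ≥ 10 or n ≤ -11) or
-- returns a value only through Python's negative-index wraparound (-10 ≤ n ≤ -1), an artefact
-- of indexing the keyhand/location tables; B's dict lookup raises KeyError on all of them.
def Pre_solution (numbers : List Int) (hand : String) : Prop :=
  ∀ n ∈ numbers, 0 ≤ n ∧ n ≤ 9
instance (numbers : List Int) (hand : String) : Decidable (Pre_solution numbers hand) := by
  unfold Pre_solution; infer_instance

def pvWitness_solution : List Int × String := ([1, 3, 4, 5, 8, 2, 1, 4, 5, 9, 5], "right")

def Spec_solution (numbers : List Int) (hand : String) (out : String) : Prop := out = solution_alt numbers hand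
instance (numbers : List Int) (hand : String) (out : String) : Decidable (Spec_solution numbers hand out) := by unfold Spec_solution; infer_instance

-- ===== CLAIM (what is proved, stated in full; the proofs are below) =====
def Claim_equal_solution : Prop := ∀ (numbers : List Int) (hand : String), Dom_solution numbers hand → Pre_solution numbers hand → Spec_solution numbers hand (solution numbers hand)

-- ===== LEMMAS AND PROOFS =====
-- every position the two hands can ever occupy
def cells : List (Int × Int) :=
  [(3, 0), (3, 2), (3, 1), (0, 0), (0, 1), (0, 2), (1, 0), (1, 1), (1, 2), (2, 0), (2, 1), (2, 2)]

def digits : List Int := [0, 1, 2, 3, 4, 5, 6, 7, 8, 9]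

theorem bfs_eq_manh :
    ∀ l ∈ cells, ∀ g ∈ cells, bfs l g = |l.1 - g.1| + |l.2 - g.2| := by
  decide

theorem locEval : ∀ n ∈ digits,
    (PySem.List.pyGet? location n).getD (0, 0) = (PySem.Dict.get? posB n).getD (0, 0) := by
  decide

theorem khEval : ∀ n ∈ digits,
    (PySem.List.pyGet? keyhand n).getD "" =
      (if n ∈ leftKeys then "L" else if n ∈ rightKeys then "R" else "M") := by
  decide

theorem locMem : ∀ n ∈ digits, (PySem.Dict.get? posB n).getD (0, 0) ∈ cells := by
  decide

theorem joinNilChars (l : List (List Char)) : PySem.Chars.join [] l = l.flatten := by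
  induction l with
  | nil => rfl
  | cons a t ih => cases t <;> simp_all [PySem.Chars.join, List.intercalate, List.intersperse]

theorem joinCons (x : String) (xs : List String) :
    PySem.Str.join "" (x :: xs) = x ++ PySem.Str.join "" xs := by
  simp [PySem.Str.join, joinNilChars]

theorem loop_eq (hand : String) :
    ∀ ns : List Int, (∀ n ∈ ns, 0 ≤ n ∧ n ≤ 9) →
      ∀ l ∈ cells, ∀ r ∈ cells,
        solLoop hand ns l r = PySem.Str.join "" (altLoop hand ns l r) := by
  intro ns
  induction ns with
  | nil => intro _ l _ r _; rfl
  | cons n ns ih =>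
    intro h l hl r hr
    obtain ⟨h0, h9⟩ := h n (List.mem_cons_self ..)
    have hns : ∀ m ∈ ns, 0 ≤ m ∧ m ≤ 9 := fun m hm => h m (List.mem_cons_of_mem _ hm)
    have hd : n ∈ digits := by unfold digits; simp; omega
    have hpc := locMem n hd
    simp only [solLoop, altLoop, khEval n hd, locEval n hd]
    by_cases hL : n ∈ leftKeys
    · simp only [if_pos hL, String.reduceEq, reduceIte]
      rw [joinCons, ih hns _ hpc _ hr]
    · by_cases hR : n ∈ rightKeys
      · simp only [if_neg hL, if_pos hR, String.reduceEq, reduceIte]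
        rw [joinCons, ih hns _ hl _ hpc]
      · simp only [if_neg hL, if_neg hR, String.reduceEq, reduceIte,
          bfs_eq_manh l hl _ hpc, bfs_eq_manh r hr _ hpc, gt_iff_lt]
        split_ifs <;>
          first
            | (rw [joinCons, ih hns _ hpc _ hr]; done)
            | (rw [joinCons, ih hns _ hl _ hpc]; done)
            | simp_all

-- ===== VERDICT (by name: the statement is the Claim_ definition above) =====
theorem solution_spec : Claim_equal_solution := by
  intro numbers hand _ hpre
  unfold Spec_solution solution solution_alt
  exact loop_eq hand numbers hpre _ (by decide) _ (by decide)
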